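-- pv_equiv track=rewrite | github.com/raeez/chiral-bar-cobar | compute/lib/bar_cohomology_verification.py | riordan
-- ===== SOURCE A (Python) =====
-- def riordan(n):
--     """Riordan number R(n), OEIS A005043.
--
--     Recurrence: (n+1)*R(n) = (n-1)*(2*R(n-1) + 3*R(n-2)), R(0)=1, R(1)=0.
--     First values: 1, 0, 1, 1, 3, 6, 15, 36, 91, 232, 603, ...
--     """
--     if n <= 0:
--         return 1
--     if n == 1:
--         return 0
--     R = [1, 0]
--     for k in range(2, n + 1):
--         num = (k - 1) * (2 * R[k - 1] + 3 * R[k - 2])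
--         assert num % (k + 1) == 0
--         R.append(num // (k + 1))
--     return R[n]
-- ===== SOURCE B (Python) =====
-- def riordan(n):
--     """Riordan number R(n), OEIS A005043.
--
--     Closed form instead of the three-term recurrence:
--         R(n) = sum_{k=0}^{n} (-1)^(n-k) * C(n,k) * Catalan(k),
--     evaluated in one pass over k with a running term
--     term = C(n,k)*Catalan(k), updated by
--         term <- term * (n-k)*(4k+2) // ((k+1)*(k+2))
--     (the division is exact).
--     """
--     if n <= 0:
--         return 1
--     total = 0
--     term = 1                         # C(n,k) * Catalan(k)
--     sign = 1 if n % 2 == 0 else -1   # (-1)^(n-k)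
--     for k in range(n + 1):
--         total += sign * term
--         sign = -sign
--         term = term * ((n - k) * (4 * k + 2)) // ((k + 1) * (k + 2))
--     return total
-- ===== Notes on version B (the rewrite author's own statement) =====
-- stated objective: alternative
-- what changed: replaces the three-term holonomic recurrence DP (build R[0..n] from (k+1)R(k)=(k-1)(2R(k-1)+3R(k-2)), then index R[n]) by the closed-form alternating binomial sum R(n) = sum_{k=0}^{n} (-1)^(n-k)*C(n,k)*Catalan(k), evaluated in one pass with exact running products for C(n,k) and Catalan(k)
import Mathlib
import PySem

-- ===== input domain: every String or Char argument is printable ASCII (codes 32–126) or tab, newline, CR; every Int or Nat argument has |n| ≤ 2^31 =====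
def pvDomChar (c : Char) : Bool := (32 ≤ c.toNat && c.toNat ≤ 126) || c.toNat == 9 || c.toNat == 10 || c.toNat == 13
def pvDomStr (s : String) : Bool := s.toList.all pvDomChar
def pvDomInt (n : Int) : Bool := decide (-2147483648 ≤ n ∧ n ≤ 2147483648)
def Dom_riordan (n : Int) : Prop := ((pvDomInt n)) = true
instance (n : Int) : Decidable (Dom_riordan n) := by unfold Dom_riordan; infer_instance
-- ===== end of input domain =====

-- B replaces A's three-term holonomic recurrence DP by the closed-form alternating
-- binomial sum R(n) = Σ_{k=0}^{n} (-1)^(n-k)·C(n,k)·Catalan(k), evaluated in one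
-- pass with running products for C(n,k) and Catalan(k) (exact integer divisions).

-- ===== PORT A =====
-- Literal port of A: list built by appending, indexed with R[k-1], R[k-2], result R[n].
-- The indices are always in range, so pyGetD's default 0 is never used.
-- A's `assert num % (k + 1) == 0` never fires (the division is exact, proved below),
-- so it is not modelled.
def riordan (n : Int) : Int :=
  if n ≤ 0 then 1
  else if n = 1 then 0
  else
    let R := (PySem.List.pyRange 2 (n + 1) 1).foldl
      (fun R k =>
        let num := (k - 1) * (2 * PySem.List.pyGetD R (k - 1) 0
                              + 3 * PySem.List.pyGetD R (k - 2) 0)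
        R ++ [PySem.Int.floordiv num (k + 1)]) [1, 0]
    PySem.List.pyGetD R n 0

-- ===== PORT B =====
-- Port of Source B: one pass over range(n+1) accumulating (total, term, sign).
def riordan_alt (n : Int) : Int :=
  if n ≤ 0 then 1
  else
    let s0 : Int := if PySem.Int.mod n 2 = 0 then 1 else -1
    let st := (PySem.List.pyRange 0 (n + 1) 1).foldl
      (fun (st : Int × Int × Int) k =>
        let total := st.1; let term := st.2.1; let sign := st.2.2
        (total + sign * term,
         PySem.Int.floordiv (term * ((n - k) * (4 * k + 2))) ((k + 1) * (k + 2)),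
         -sign))
      (0, 1, s0)
    st.1

-- ===== PRECONDITION & SPEC =====
def Spec_riordan (n : Int) (out : Int) : Prop := out = riordan_alt n
instance (n : Int) (out : Int) : Decidable (Spec_riordan n out) := by unfold Spec_riordan; infer_instance

-- ===== CLAIM =====
def Claim_equal_riordan : Prop := ∀ (n : Int), Dom_riordan n → Spec_riordan n (riordan n)

-- ===== LEMMAS AND PROOFS =====

-- The summand F n k = (-1)^(n-k)·C(n,k)·Catalan(k) and S n = Σ_{k≤n} F n k.
def F (n k : Nat) : Int := (-1) ^ (n + k) * (n.choose k) * (catalan k)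

def S (n : Nat) : Int := ∑ k ∈ Finset.range (n + 1), F n k

-- Zeilberger certificate for the sum S.
def G (n k : Nat) : Int :=
  match k with
  | 0 => 0
  | j + 1 => (-1) ^ (n + j) * ((j : Int) + 2) * ((n + 1).choose j) * catalan (j + 1)

-- Catalan ratio: (k+2)·Cat(k+1) = 2(2k+1)·Cat(k).
lemma catalan_ratio (k : Nat) : (k + 2) * catalan (k + 1) = 2 * (2 * k + 1) * catalan k := by
  have h1 := succ_mul_catalan_eq_centralBinom (k + 1)
  have h2 := succ_mul_catalan_eq_centralBinom k
  have h3 := Nat.succ_mul_centralBinom_succ k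
  have : (k + 1) * ((k + 2) * catalan (k + 1)) = (k + 1) * (2 * (2 * k + 1) * catalan k) := by
    calc (k + 1) * ((k + 2) * catalan (k + 1)) = (k + 1) * ((k + 1 + 1) * catalan (k + 1)) := by ring_nf
    _ = (k + 1) * (k + 1).centralBinom := by rw [h1]
    _ = 2 * (2 * k + 1) * k.centralBinom := h3
    _ = 2 * (2 * k + 1) * ((k + 1) * catalan k) := by rw [h2]
    _ = (k + 1) * (2 * (2 * k + 1) * catalan k) := by ring
  exact Nat.eq_of_mul_eq_mul_left (by omega) this

-- Absorption identities over ℤ (hold for all j, both sides vanish out of range).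
lemma choose_abs1 (n j : Nat) :
    (((n + 1).choose (j + 1) : ℤ)) * ((j : ℤ) + 1) = ((n + 1).choose j) * ((n : ℤ) + 1 - j) := by
  rcases Nat.lt_or_ge (n + 1) j with h | h
  case inl =>
    rw [Nat.choose_eq_zero_of_lt (by omega), Nat.choose_eq_zero_of_lt (by omega)]
    simp
  case inr =>
    have h0 := Nat.choose_succ_right_eq (n + 1) j
    have hc := congrArg (Nat.cast : Nat → ℤ) h0
    push_cast [Nat.cast_sub h] at hc
    linarith [hc]

lemma choose_abs2 (n j : Nat) :
    ((n : ℤ) + 1) * (n.choose (j + 1)) = (((n + 1).choose (j + 1) : ℤ)) * ((n : ℤ) - j) := by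
  rcases Nat.lt_or_ge n (j + 1) with h | h
  case inl =>
    rcases Nat.lt_or_ge n j with h' | h'
    · rw [Nat.choose_eq_zero_of_lt (by omega), Nat.choose_eq_zero_of_lt (by omega)]
      simp
    · have hj : j = n := by omega
      subst hj
      rw [Nat.choose_eq_zero_of_lt (by omega)]
      simp
  case inr =>
    have h1 := Nat.add_one_mul_choose_eq n (j + 1)
    have h2 := Nat.choose_succ_right_eq (n + 1) (j + 1)
    have h3 : (n + 1) * n.choose (j + 1) = (n + 1).choose (j + 1) * (n + 1 - (j + 1)) :=
      h1.trans h2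
    have hc := congrArg (Nat.cast : Nat → ℤ) h3
    push_cast [Nat.cast_sub (by omega : j ≤ n)] at hc
    linarith [hc]

-- Per-term certificate identity.
lemma perterm (n k : Nat) :
    ((n : ℤ) + 3) * F (n + 2) k - 2 * ((n : ℤ) + 1) * F (n + 1) k - 3 * ((n : ℤ) + 1) * F n k
      = G n (k + 1) - G n k := by
  cases k with
  | zero =>
      simp only [F, G, Nat.choose_zero_right, catalan_zero, Nat.cast_one, Nat.add_zero]
      push_cast
      ring_nf
      norm_num [catalan_one]
  | succ j =>
      have e4 : ((j : ℤ) + 3) * (catalan (j + 2) : ℤ) = 2 * (2 * (j : ℤ) + 3) * (catalan (j + 1) : ℤ) := by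
        have := catalan_ratio (j + 1)
        have hc := congrArg (Nat.cast : Nat → ℤ) this
        push_cast at hc
        linarith [hc]
      have h1 : (((n + 2).choose (j + 1) : ℤ)) = ((n + 1).choose j : ℤ) + ((n + 1).choose (j + 1) : ℤ) := by
        exact_mod_cast Nat.choose_succ_succ' (n + 1) j
      have h2 := choose_abs1 n j
      have h3 := choose_abs2 n j
      show ((n : ℤ) + 3) * ((-1) ^ (n + 2 + (j + 1)) * ((n + 2).choose (j + 1)) * (catalan (j + 1)))
          - 2 * ((n : ℤ) + 1) * ((-1) ^ (n + 1 + (j + 1)) * ((n + 1).choose (j + 1)) * (catalan (j + 1)))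
          - 3 * ((n : ℤ) + 1) * ((-1) ^ (n + (j + 1)) * (n.choose (j + 1)) * (catalan (j + 1)))
          = (-1) ^ (n + (j + 1)) * (((j + 1 : Nat) : ℤ) + 2) * ((n + 1).choose (j + 1)) * (catalan (j + 1 + 1))
            - (-1) ^ (n + j) * ((j : ℤ) + 2) * ((n + 1).choose j) * (catalan (j + 1))
      push_cast
      linear_combination
        (-((-1 : ℤ) ^ (n + j) * (catalan (j + 1) : ℤ)) * ((n : ℤ) + 3)) * h1
        + ((-1 : ℤ) ^ (n + j) * (catalan (j + 1) : ℤ)) * h2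
        + (3 * (-1 : ℤ) ^ (n + j) * (catalan (j + 1) : ℤ)) * h3
        + ((-1 : ℤ) ^ (n + j) * (((n + 1).choose (j + 1) : ℤ))) * e4

lemma F_eq_zero (n k : Nat) (h : n < k) : F n k = 0 := by
  simp [F, Nat.choose_eq_zero_of_lt h]

lemma sum_F_ext (n m : Nat) (h : n + 1 ≤ m) :
    ∑ k ∈ Finset.range m, F n k = S n := by
  rw [S]
  symm
  apply Finset.sum_subset
  · intro x hx
    simp only [Finset.mem_range] at hx ⊢
    omega
  intro x hx hnx
  simp only [Finset.mem_range] at hx hnx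
  exact F_eq_zero n x (by omega)

-- The key P-recurrence of the closed-form sum.
lemma key (n : Nat) : ((n : ℤ) + 3) * S (n + 2) = ((n : ℤ) + 1) * (2 * S (n + 1) + 3 * S n) := by
  have tel := Finset.sum_range_sub (fun k => G n k) (n + 3)
  have hsum : ∑ k ∈ Finset.range (n + 3),
      (((n : ℤ) + 3) * F (n + 2) k - 2 * ((n : ℤ) + 1) * F (n + 1) k - 3 * ((n : ℤ) + 1) * F n k)
      = G n (n + 3) - G n 0 := by
    rw [← tel]; exact Finset.sum_congr rfl fun k _ => perterm n k
  have hG0 : G n 0 = 0 := rfl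
  have hGtop : G n (n + 3) = 0 := by
    show (-1) ^ (n + (n + 2)) * ((n + 2 : Int) + 2) * ((n + 1).choose (n + 2)) * catalan (n + 3) = 0
    rw [Nat.choose_eq_zero_of_lt (by omega)]
    simp
  rw [hG0, hGtop] at hsum
  have e2 : ∑ k ∈ Finset.range (n + 3), F (n + 2) k = S (n + 2) := sum_F_ext _ _ (by omega)
  have e1 : ∑ k ∈ Finset.range (n + 3), F (n + 1) k = S (n + 1) := sum_F_ext _ _ (by omega)
  have e0 : ∑ k ∈ Finset.range (n + 3), F n k = S n := sum_F_ext _ _ (by omega)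
  rw [Finset.sum_sub_distrib, Finset.sum_sub_distrib, ← Finset.mul_sum, ← Finset.mul_sum,
    ← Finset.mul_sum, e2, e1, e0] at hsum
  linarith [hsum]

lemma S_zero : S 0 = 1 := by simp [S, F]
lemma S_one : S 1 = 0 := by
  rw [S]
  rw [Finset.sum_range_succ, Finset.sum_range_one]
  simp [F]

-- A's loop body.
def stepA (R : List Int) (k : Int) : List Int :=
  R ++ [PySem.Int.floordiv ((k - 1) * (2 * PySem.List.pyGetD R (k - 1) 0
                                       + 3 * PySem.List.pyGetD R (k - 2) 0)) (k + 1)]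

-- B's loop body (n fixed).
def stepB (n : Int) (st : Int × Int × Int) (k : Int) : Int × Int × Int :=
  (st.1 + st.2.2 * st.2.1,
   PySem.Int.floordiv (st.2.1 * ((n - k) * (4 * k + 2))) ((k + 1) * (k + 2)),
   -st.2.2)

-- Exact division: floordiv (b*a) b = a for 0 < b.
lemma floordiv_mul_cancel (b a : Int) (hb : 0 < b) : PySem.Int.floordiv (b * a) b = a := by
  rw [PySem.Int.floordiv_eq_ediv_of_pos hb]
  exact Int.mul_ediv_cancel_left a (by omega)

-- A's fold computes the list [S 0, …, S (j+1)].
lemma foldA (j : Nat) :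
    (PySem.List.pyRange 2 (2 + (j : Int)) 1).foldl stepA [1, 0]
      = (List.range (j + 2)).map (fun i => S i) := by
  induction j with
  | zero =>
      rw [show (2 + ((0 : Nat) : Int)) = 2 by norm_num,
        PySem.List.pyRange_one_eq_nil (by norm_num)]
      simp [List.range_succ, S_zero, S_one]
  | succ j ih =>
      have hrange : PySem.List.pyRange 2 (2 + ((j : Int) + 1)) 1
          = PySem.List.pyRange 2 (2 + (j : Int)) 1 ++ [2 + (j : Int)] := by
        have := PySem.List.pyRange_one_succ_right (a := 2) (b := 2 + (j : Int)) (by omega)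
        simpa [add_assoc] using this
      push_cast [hrange]
      rw [List.foldl_append, ih]
      simp only [List.foldl_cons, List.foldl_nil, stepA]
      have i1 : (2 + (j : ℤ) - 1) = (((j + 1 : Nat)) : ℤ) := by push_cast; ring
      have i2 : (2 + (j : ℤ) - 2) = (((j : Nat)) : ℤ) := by ring
      rw [i1, i2, PySem.List.pyGetD_natCast, PySem.List.pyGetD_natCast]
      have g1 : ((List.range (j + 2)).map (fun i => S i)).getD (j + 1) 0 = S (j + 1) := by
        rw [List.getD_eq_getElem?_getD, List.getElem?_map, List.getElem?_range (by omega)]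
        rfl
      have g2 : ((List.range (j + 2)).map (fun i => S i)).getD j 0 = S j := by
        rw [List.getD_eq_getElem?_getD, List.getElem?_map, List.getElem?_range (by omega)]
        rfl
      rw [g1, g2]
      have i3 : (2 + (j : ℤ) + 1) = ((j : ℤ) + 3) := by ring
      have i4 : ((((j + 1 : Nat)) : ℤ)) * (2 * S (j + 1) + 3 * S j) = ((j : ℤ) + 3) * S (j + 2) := by
        have hk := key j
        push_cast
        linarith [hk]
      rw [i3, i4, floordiv_mul_cancel _ _ (by omega)]
      rw [show j + 1 + 2 = (j + 2) + 1 by omega, List.range_succ]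
      simp [List.range_succ]

-- B's fold invariant.
lemma foldB (n : Nat) (j : Nat) (hj : j ≤ n + 1) :
    (PySem.List.pyRange 0 (j : Int) 1).foldl (stepB (n : Int)) (0, 1, (-1) ^ n)
      = (∑ k ∈ Finset.range j, F n k, (n.choose j : Int) * (catalan j : Int), (-1) ^ (n + j)) := by
  induction j with
  | zero =>
      rw [show (((0 : Nat)) : Int) = 0 by norm_num, PySem.List.pyRange_one_eq_nil (by norm_num)]
      simp
  | succ j ih =>
      have hrange : PySem.List.pyRange 0 ((j : Int) + 1) 1
          = PySem.List.pyRange 0 (j : Int) 1 ++ [(j : Int)] := by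
        exact PySem.List.pyRange_one_succ_right (a := 0) (b := (j : Int)) (by omega)
      push_cast [hrange]
      rw [List.foldl_append, ih (by omega)]
      simp only [List.foldl_cons, List.foldl_nil, stepB]
      simp only [Prod.mk.injEq]
      refine ⟨?_, ?_, ?_⟩
      · show (∑ k ∈ Finset.range j, F n k) + (-1) ^ (n + j) * ((n.choose j : Int) * (catalan j : Int))
            = ∑ k ∈ Finset.range (j + 1), F n k
        rw [Finset.sum_range_succ]
        show _ = _ + (-1 : Int) ^ (n + j) * (n.choose j : Int) * (catalan j : Int)
        ring
      · show PySem.Int.floordiv ((n.choose j : Int) * (catalan j : Int) * (((n : Int) - (j : Int)) * (4 * (j : Int) + 2)))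
              (((j : Int) + 1) * ((j : Int) + 2))
            = (n.choose (j + 1) : Int) * (catalan (j + 1) : Int)
        have h1 : ((n.choose j : Int)) * ((n : Int) - (j : Int))
            = ((j : Int) + 1) * (n.choose (j + 1) : Int) := by
          have h0 := Nat.choose_succ_right_eq n j
          have hc := congrArg (Nat.cast : Nat → ℤ) h0
          push_cast [Nat.cast_sub (by omega : j ≤ n)] at hc
          linarith [hc]
        have h2 : ((catalan j : Int)) * (4 * (j : Int) + 2)
            = ((j : Int) + 2) * (catalan (j + 1) : Int) := by
          have h0 := catalan_ratio j
          have hc := congrArg (Nat.cast : Nat → ℤ) h0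
          push_cast at hc
          linarith [hc]
        have hnum : (n.choose j : Int) * (catalan j : Int) * (((n : Int) - (j : Int)) * (4 * (j : Int) + 2))
            = (((j : Int) + 1) * ((j : Int) + 2)) * ((n.choose (j + 1) : Int) * (catalan (j + 1) : Int)) := by
          have := congrArg₂ (· * ·) h1 h2
          simp only at this
          linear_combination this
        rw [hnum, floordiv_mul_cancel _ _ (by positivity)]
      · show -((-1 : Int) ^ (n + j)) = (-1) ^ (n + (j + 1))
        rw [show n + (j + 1) = (n + j) + 1 by omega, pow_succ]
        ring

-- B's port computes S N for every positive N.
lemma altB (N : Nat) (h : 1 ≤ N) : riordan_alt (N : Int) = S N := by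
  unfold riordan_alt
  rw [if_neg (by omega : ¬ ((N : Int) ≤ 0))]
  show ((PySem.List.pyRange 0 ((N : Int) + 1) 1).foldl (stepB (N : Int))
      (0, 1, if PySem.Int.mod (N : Int) 2 = 0 then 1 else -1)).1 = S N
  have hs : (if PySem.Int.mod (N : Int) 2 = 0 then (1 : Int) else -1) = (-1) ^ N := by
    rcases Nat.even_or_odd N with he | ho
    · rw [if_pos, he.neg_one_pow]
      rw [show ((2 : Int)) = ((2 : Nat) : Int) by norm_num, PySem.Int.mod_natCast]
      obtain ⟨m, hm⟩ := he
      subst hm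
      simp [show m + m = 2 * m by omega, Nat.mul_mod_right]
    · rw [if_neg, ho.neg_one_pow]
      rw [show ((2 : Int)) = ((2 : Nat) : Int) by norm_num, PySem.Int.mod_natCast]
      obtain ⟨m, hm⟩ := ho
      subst hm
      simp
  rw [hs]
  have hfold := foldB N (N + 1) (by omega)
  rw [show ((N : Int) + 1) = (((N + 1 : Nat)) : Int) by push_cast; ring, hfold]
  rfl

-- A's port computes S N for every N ≥ 2.
lemma altA (N : Nat) (h : 2 ≤ N) : riordan (N : Int) = S N := by
  unfold riordan
  rw [if_neg (by omega : ¬ ((N : Int) ≤ 0)), if_neg (by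
    intro hc
    have : N = 1 := by exact_mod_cast hc
    omega)]
  show PySem.List.pyGetD ((PySem.List.pyRange 2 ((N : Int) + 1) 1).foldl stepA [1, 0]) (N : Int) 0 = S N
  rw [show ((N : Int) + 1) = 2 + (((N - 2 + 1 : Nat)) : Int) by push_cast [Nat.cast_sub h]; ring]
  rw [foldA (N - 2 + 1), PySem.List.pyGetD_natCast]
  rw [List.getD_eq_getElem?_getD, List.getElem?_map, List.getElem?_range (by omega)]
  rfl

-- ===== VERDICT =====
theorem riordan_spec : Claim_equal_riordan := by
  intro n _
  show riordan n = riordan_alt n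
  by_cases h0 : n ≤ 0
  · unfold riordan riordan_alt
    simp [h0]
  · have hn : ((n.toNat : Nat) : Int) = n := Int.toNat_of_nonneg (by omega)
    by_cases h1 : n.toNat = 1
    · rw [← hn, h1]
      rw [altB 1 (by omega)]
      unfold riordan
      norm_num [S_one]
    · rw [← hn, altA n.toNat (by omega), altB n.toNat (by omega)]
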